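-- pv_equiv track=rewrite | github.com/lululeta2014/mihaib | forge/old/prjeuler/p115.py | f
-- ===== SOURCE A (Python) =====
-- def f(block_size=50):
--     w = []
--     for i in range(block_size):
--         w.append(1)
--
--     i = block_size
--     while (True):
--         # red block of length i
--         x = 1
--         # black block
--         x = x + w[i-1]
--
--         # red block of length j followed by black block
--         for j in range(block_size, i):
--             x = x + w[i - j - 1]
--
--         w.append(x)
--
--         if x > 1000000:
--             return i
--
--         i = i + 1
-- ===== SOURCE B (Python) =====
-- def f(block_size=50):
--     w = [1] * block_size
--     prev = 1
--     s = 0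
--     i = block_size
--     while True:
--         x = 1 + prev + s
--         w.append(x)
--         if x > 1000000:
--             return i
--         s += w[i - block_size]
--         prev = x
--         i += 1
-- ===== Notes on version B (the rewrite author's own statement) =====
-- stated objective: faster
-- what changed: B replaces A's inner loop that re-sums w[0..i-block_size-1] on every iteration by a running prefix sum s and a carried previous value, updated in O(1) per iteration.
-- outside the precondition, e.g. on f(0): A raises IndexError, B returns 14
import Mathlib
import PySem

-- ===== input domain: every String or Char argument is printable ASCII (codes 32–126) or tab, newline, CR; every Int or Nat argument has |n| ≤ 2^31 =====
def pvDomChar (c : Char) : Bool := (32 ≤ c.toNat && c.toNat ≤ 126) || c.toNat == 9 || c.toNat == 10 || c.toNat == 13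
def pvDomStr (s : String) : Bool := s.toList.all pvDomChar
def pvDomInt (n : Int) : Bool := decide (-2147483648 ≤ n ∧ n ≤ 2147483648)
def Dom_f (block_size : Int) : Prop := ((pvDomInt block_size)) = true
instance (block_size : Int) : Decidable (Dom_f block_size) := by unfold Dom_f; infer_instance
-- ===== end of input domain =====

-- B replaces A's quadratic inner summation loop by a running prefix sum updated in O(1)
-- per iteration (objective: faster).

-- Both ports represent the growing Python list 'w' as an Array (append = push);
-- indexing w[i] uses PySem's own index rule (pyIdx?), so it is exact Python list indexing
-- (negative index wraps once, out of range = IndexError = none).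
def pyAGet? (a : Array Int) (i : Int) : Option Int :=
  (PySem.List.pyIdx? a.size i).bind fun k => a[k]?

-- ===== PORT A =====
-- 'w = []; for i in range(block_size): w.append(1)'
def fInitW (block_size : Int) : Array Int :=
  (PySem.List.pyRange 0 block_size 1).foldl (fun w _ => w.push (1 : Int)) #[]

-- the 'while True' loop; the fuel bound 1000001 merely makes the recursion total:
-- x starts at 2 and strictly increases every iteration, so the Python loop returns
-- within that many iterations on every input Pre_f admits (the fuel-0 default 0 is never reached).
def fLoopA (block_size : Int) (w : Array Int) (i : Int) : Nat → Int
  | 0 => 0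
  | Nat.succ fuel =>
    let x : Int := 1
    let x := x + (pyAGet? w (i - 1)).getD 0
    let x := (PySem.List.pyRange block_size i 1).foldl
      (fun x j => x + (pyAGet? w (i - j - 1)).getD 0) x
    let w' := w.push x
    if x > 1000000 then i else fLoopA block_size w' (i + 1) fuel

def f (block_size : Int) : Int :=
  fLoopA block_size (fInitW block_size) block_size 1000001

-- ===== PORT B =====
-- same fuel bound as above, for the same reason (B's x is identical to A's at every step)
def fLoopB (block_size : Int) (w : Array Int) (prev s i : Int) : Nat → Int
  | 0 => 0
  | Nat.succ fuel =>
    let x := 1 + prev + s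
    let w' := w.push x
    if x > 1000000 then i
    else fLoopB block_size w' x (s + (pyAGet? w' (i - block_size)).getD 0) (i + 1) fuel

def f_alt (block_size : Int) : Int :=
  fLoopB block_size (Array.replicate block_size.toNat 1) 1 0 block_size 1000001

-- ===== PRECONDITION & SPEC =====
-- Pre_f excludes block_size ≤ 0, where A raises IndexError (w[i-1] on the empty list).
def Pre_f (block_size : Int) : Prop := 1 ≤ block_size
instance (block_size : Int) : Decidable (Pre_f block_size) := by unfold Pre_f; infer_instance
def pvWitness_f : Int := (5)

def Spec_f (block_size : Int) (out : Int) : Prop := out = f_alt block_size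
instance (block_size : Int) (out : Int) : Decidable (Spec_f block_size out) := by unfold Spec_f; infer_instance

-- ===== CLAIM (what is proved, stated in full; the proofs are below) =====
def Claim_equal_f : Prop := ∀ (block_size : Int), Dom_f block_size → Pre_f block_size → Spec_f block_size (f block_size)

-- ===== LEMMAS AND PROOFS =====

-- Array indexing agrees with PySem's Python-exact list indexing
lemma pyAGet?_eq (a : Array Int) (i : Int) :
    pyAGet? a i = PySem.List.pyGet? a.toList i := by
  simp [pyAGet?, PySem.List.pyGet?]

-- building the initial array of ones
lemma fInitW_eq (block_size : Int) :
    fInitW block_size = Array.replicate block_size.toNat 1 := by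
  rw [← Array.toList_inj]
  simp [fInitW, PySem.List.length_pyRange_one]

-- A's inner loop, read off as the reversed prefix of w
lemma map_pyRange_eq_rev_take (w : List Int) (bs : Int) (hbs : 0 ≤ bs)
    (hle : bs ≤ (w.length : Int)) :
    (PySem.List.pyRange bs (w.length : Int) 1).map
      (fun j => (PySem.List.pyGet? w ((w.length : Int) - j - 1)).getD 0)
    = (w.take ((w.length : Int) - bs).toNat).reverse := by
  apply List.ext_getElem
  · simp [PySem.List.length_pyRange_one]
    omega
  · intro k h1 h2
    have hm : ((w.length : Int) - bs).toNat ≤ w.length := by omega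
    have hk : k < ((w.length : Int) - bs).toNat := by
      simpa [PySem.List.length_pyRange_one] using h1
    have hidx : ((w.length : Int) - (bs + (k : Int)) - 1)
        = ((((w.length : Int) - bs).toNat - 1 - k : Nat) : Int) := by
      omega
    have hlt : (((w.length : Int) - bs).toNat - 1 - k) < w.length := by omega
    simp [PySem.List.getElem_pyRange_one, hidx,
      List.getElem_reverse, List.getElem_take, hlt]
    congr 1
    omega

-- one full loop step of A computes 1 + prev + s
lemma stepA_val (w : List Int) (bs : Int) (hbs : 1 ≤ bs) (hne : w ≠ [])
    (hle : bs ≤ (w.length : Int)) (prev : Int) (hprev : some prev = w.getLast?) :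
    (PySem.List.pyRange bs (w.length : Int) 1).foldl
      (fun x j => x + (PySem.List.pyGet? w ((w.length : Int) - j - 1)).getD 0)
      (1 + (PySem.List.pyGet? w ((w.length : Int) - 1)).getD 0)
    = 1 + prev + (w.take ((w.length : Int) - bs).toNat).sum := by
  rw [PySem.List.foldl_add, map_pyRange_eq_rev_take w bs (by omega) hle, List.sum_reverse]
  have h1 : 0 < w.length := List.length_pos_of_ne_nil hne
  have hidx : ((w.length : Int) - 1) = ((w.length - 1 : Nat) : Int) := by omega
  rw [hidx, PySem.List.pyGet?_natCast]
  rw [List.getLast?_eq_getElem? ] at hprev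
  simp only [List.getElem?_eq_getElem (by omega : w.length - 1 < w.length)] at hprev ⊢
  cases hprev
  simp

-- the prefix sum update of B
lemma sum_take_append (w : List Int) (x : Int) (m : Nat) (hm : m < w.length) :
    ((w ++ [x]).take (m + 1)).sum
      = (w.take m).sum + ((w ++ [x])[m]?).getD 0 := by
  have : (w ++ [x])[m]? = some w[m] := by
    rw [List.getElem?_append_left hm]; exact List.getElem?_eq_getElem hm
  rw [List.take_append_of_le_length (by omega), this, List.sum_take_succ w m hm]
  rfl

-- lockstep equivalence of the two loops
lemma loop_eq (bs : Int) (hbs : 1 ≤ bs) (fuel : Nat) :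
    ∀ (w : Array Int) (prev s : Int), w.toList ≠ [] → bs ≤ (w.size : Int) →
    some prev = w.toList.getLast? →
    s = (w.toList.take ((w.size : Int) - bs).toNat).sum →
    fLoopA bs w (w.size : Int) fuel = fLoopB bs w prev s (w.size : Int) fuel := by
  induction fuel with
  | zero => intro w prev s _ _ _ _; rfl
  | succ fuel ih =>
    intro w prev s hne hle hprev hs
    have hlen : w.toList.length = w.size := Array.length_toList
    have hx : (PySem.List.pyRange bs (w.size : Int) 1).foldl
        (fun x j => x + (pyAGet? w ((w.size : Int) - j - 1)).getD 0)
        (1 + (pyAGet? w ((w.size : Int) - 1)).getD 0)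
        = 1 + prev + s := by
      rw [hs]
      simp only [pyAGet?_eq, ← hlen]
      exact stepA_val w.toList bs hbs hne (by omega) prev hprev
    show (if _ then _ else _) = (if _ then _ else _)
    rw [hx]
    by_cases hgt : 1 + prev + s > 1000000
    · simp [hgt]
    · simp only [hgt, if_false]
      set x := 1 + prev + s with hxdef
      set w' := w.push x with hw'
      have hw'l : w'.toList = w.toList ++ [x] := by rw [hw']; exact Array.toList_push
      have hsize' : w'.size = w.size + 1 := by rw [hw']; exact Array.size_push x
      have hm : ((w.size : Int) - bs).toNat < w.toList.length := by omega
      have hsum : s + (pyAGet? w' ((w.size : Int) - bs)).getD 0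
          = (w'.toList.take (((w'.size : Int)) - bs).toNat).sum := by
        have hmm : (((w'.size : Int)) - bs).toNat
            = ((w.size : Int) - bs).toNat + 1 := by omega
        rw [hmm, hw'l, sum_take_append w.toList x _ hm, hs]
        congr 1
        rw [pyAGet?_eq, hw'l]
        have hidx : ((w.size : Int) - bs) = ((((w.size : Int) - bs).toNat : Nat) : Int) := by
          omega
        rw [hidx, PySem.List.pyGet?_natCast]
        congr 2
      have h1 := ih w' x (s + (pyAGet? w' ((w.size : Int) - bs)).getD 0)
        (by simp [hw'l]) (by omega)
        (by rw [hw'l]; exact (List.getLast?_concat).symm)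
        hsum
      rw [hsize'] at h1
      push_cast at h1
      exact h1

-- ===== VERDICT (by name: the statement is the Claim_ definition above) =====
theorem f_spec : Claim_equal_f := by
  intro bs _ hpre
  unfold Spec_f f f_alt
  rw [fInitW_eq]
  have hpre' : 1 ≤ bs := hpre
  have hsize : (((Array.replicate bs.toNat (1 : Int)).size : Nat) : Int) = bs := by
    simp; omega
  have h := loop_eq bs hpre' 1000001 (Array.replicate bs.toNat 1) 1 0
    (by simp [Array.toList_replicate]; omega)
    (by rw [hsize])
    (by
      rw [Array.toList_replicate]
      have : bs.toNat = (bs.toNat - 1) + 1 := by omega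
      rw [this, List.replicate_succ']
      exact (List.getLast?_concat).symm)
    (by rw [hsize]; simp)
  rw [hsize] at h
  exact h
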